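-- pv_equiv track=rewrite | github.com/data0504/PythonSmallTest | DataOnlineGame/Server.py | slotMachineParseRandomList
-- ===== SOURCE A (Python) =====
-- def slotMachineParseRandomList(size ,rowRandomList):
--     _comboGrand = []
--     for m in range(size):
--         _grandtotal = 1
--         _comboStart = True
--         for n in range(size-1):
--             _singleRemainList = rowRandomList [size + (size * n) : size + size + (size * n)]
--             if _comboStart:
--                 if rowRandomList[m] in _singleRemainList :
--                     _comboStart = True
--                     _grandtotal += 1
--                 else:
--                     _comboStart = False
--                     break
--         _comboGrand.append(_grandtotal)
--     return _comboGrand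
-- ===== SOURCE B (Python) =====
-- def slotMachineParseRandomList(size, rowRandomList):
--     counts = [1] * size
--     active = list(range(size))
--     for r in range(1, size):
--         row = set(rowRandomList[size * r : size * (r + 1)])
--         nxt = []
--         for m in active:
--             if rowRandomList[m] in row:
--                 counts[m] += 1
--                 nxt.append(m)
--         active = nxt
--     return counts
-- ===== Notes on version B (the rewrite author's own statement) =====
-- stated objective: faster
-- what changed: A scans column-by-column: for each first-row slot it re-slices every later row and does a linear membership scan; B does one row-major sweep maintaining a shrinking frontier of still-running streaks and a hash set per row, so each row is materialised once and membership is O(1).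
import Mathlib
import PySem

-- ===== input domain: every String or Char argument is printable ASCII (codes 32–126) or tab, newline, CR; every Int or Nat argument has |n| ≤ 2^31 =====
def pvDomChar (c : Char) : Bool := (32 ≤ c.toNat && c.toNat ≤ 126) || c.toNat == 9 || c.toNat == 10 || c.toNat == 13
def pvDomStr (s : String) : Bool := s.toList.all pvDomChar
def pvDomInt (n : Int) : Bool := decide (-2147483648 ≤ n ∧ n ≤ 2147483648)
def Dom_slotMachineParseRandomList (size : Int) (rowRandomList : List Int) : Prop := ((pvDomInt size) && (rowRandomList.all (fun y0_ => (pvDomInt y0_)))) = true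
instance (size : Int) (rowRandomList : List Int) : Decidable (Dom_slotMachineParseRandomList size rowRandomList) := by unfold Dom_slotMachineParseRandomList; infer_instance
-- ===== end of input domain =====

-- B replaces A's column-by-column rescanning with a single row-major sweep over a shrinking
-- frontier of still-running streaks, using one hash set per row (objective: faster).

-- ===== PORT A =====
def slotMachineParseRandomList (size : Int) (rowRandomList : List Int) : List Int :=
  (PySem.List.pyRange 0 size 1).foldl (fun comboGrand m =>
    let res := (PySem.List.pyRange 0 (size - 1) 1).foldl (fun (st : Int × Bool) n =>
      let singleRemainList :=
        PySem.List.slice rowRandomList (some (size + size * n)) (some (size + size + size * n))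
      if st.2 then
        if PySem.List.pyGetD rowRandomList m 0 ∈ singleRemainList then (st.1 + 1, true)
        else (st.1, false)
      else st) (1, true)
    comboGrand ++ [res.1]) []

-- ===== PORT B =====
def slotMachineParseRandomList_alt (size : Int) (rowRandomList : List Int) : List Int :=
  let counts : List Int := PySem.List.pyRepeat [1] size
  let active : List Int := PySem.List.pyRange 0 size 1
  ((PySem.List.pyRange 1 size 1).foldl (fun (st : List Int × List Int) r =>
    let row : PySem.Set Int :=
      PySem.Set.ofList (PySem.List.slice rowRandomList (some (size * r)) (some (size * (r + 1))))
    st.2.foldl (fun (q : List Int × List Int) m =>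
      if PySem.List.pyGetD rowRandomList m 0 ∈ row then
        (PySem.List.pySetD q.1 m (PySem.List.pyGetD q.1 m 0 + 1), q.2 ++ [m])
      else q) (st.1, ([] : List Int))) (counts, active)).1

-- ===== PRECONDITION & SPEC =====
-- Pre_ excludes exactly the inputs where the Python A raises IndexError (size ≥ 2 with fewer
-- than size elements, so rowRandomList[m] is out of range); B raises there too.
def Pre_slotMachineParseRandomList (size : Int) (rowRandomList : List Int) : Prop :=
  size ≤ 1 ∨ size ≤ (rowRandomList.length : Int)
instance (size : Int) (rowRandomList : List Int) : Decidable (Pre_slotMachineParseRandomList size rowRandomList) := by unfold Pre_slotMachineParseRandomList; infer_instance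

def pvWitness_slotMachineParseRandomList : Int × List Int := (2, [1, 2, 2, 3])

def Spec_slotMachineParseRandomList (size : Int) (rowRandomList : List Int) (out : List Int) : Prop := out = slotMachineParseRandomList_alt size rowRandomList
instance (size : Int) (rowRandomList : List Int) (out : List Int) : Decidable (Spec_slotMachineParseRandomList size rowRandomList out) := by unfold Spec_slotMachineParseRandomList; infer_instance

-- ===== CLAIM (what is proved, stated in full; the proofs are below) =====
def Claim_equal_slotMachineParseRandomList : Prop := ∀ (size : Int) (rowRandomList : List Int), Dom_slotMachineParseRandomList size rowRandomList → Pre_slotMachineParseRandomList size rowRandomList → Spec_slotMachineParseRandomList size rowRandomList (slotMachineParseRandomList size rowRandomList)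

-- ===== LEMMAS AND PROOFS =====

-- x_m, as both programs read it
def pvX (rl : List Int) (m : Int) : Int := PySem.List.pyGetD rl m 0

-- the k-th later row (k = 0 is Python's row 1), in A's slice shape
def pvRow (size : Int) (rl : List Int) (k : Nat) : List Int :=
  PySem.List.slice rl (some (size + size * k)) (some (size + size + size * k))

-- number of consecutive later rows containing xv
def pvLen (size : Int) (rl : List Int) (xv : Int) : Int :=
  (((((List.range (size - 1).toNat).map (pvRow size rl))).takeWhile
      (fun row => decide (xv ∈ row))).length : Int)

-- A's inner loop, once comboStart is false, does nothing
lemma A_dead (x : Int) (rows : List (List Int)) (t : Int) :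
    rows.foldl (fun (st : Int × Bool) row =>
      if st.2 then (if x ∈ row then (st.1 + 1, true) else (st.1, false)) else st) (t, false)
    = (t, false) := by
  induction rows with
  | nil => rfl
  | cons r rs ih => simpa using ih

-- A's inner loop counts the takeWhile prefix
lemma A_inner (x : Int) (rows : List (List Int)) (t : Int) :
    (rows.foldl (fun (st : Int × Bool) row =>
      if st.2 then (if x ∈ row then (st.1 + 1, true) else (st.1, false)) else st) (t, true)).1
    = t + ((rows.takeWhile (fun row => decide (x ∈ row))).length : Int) := by
  induction rows generalizing t with
  | nil => simp
  | cons r rs ih =>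
    by_cases hx : x ∈ r
    · simp [hx, ih]; push_cast; ring
    · simp [hx, A_dead]

lemma A_char (size : Int) (rl : List Int) :
    slotMachineParseRandomList size rl
      = (PySem.List.pyRange 0 size 1).map (fun m => 1 + pvLen size rl (pvX rl m)) := by
  unfold slotMachineParseRandomList
  rw [PySem.List.foldl_append_singleton_eq_map]
  rw [List.nil_append]
  refine List.map_congr_left fun m _ => ?_
  rw [show PySem.List.pyRange 0 (size - 1) 1
        = (List.range (size - 1).toNat).map (fun k : Nat => (k : Int)) by
      simpa using PySem.List.pyRange_one 0 (size - 1)]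
  rw [List.foldl_map]
  have := A_inner (pvX rl m)
    ((List.range (size - 1).toNat).map (pvRow size rl)) 1
  rw [List.foldl_map] at this
  simp only [pvRow, pvX] at this ⊢
  simpa [pvLen, pvRow] using this

-- takeWhile lengths agree when the predicates agree pointwise along the index list
lemma takeWhile_length_map_eq {α β γ : Type} (l : List γ) (f : γ → α) (g : γ → β)
    (p : α → Bool) (q : β → Bool) (h : ∀ c ∈ l, p (f c) = q (g c)) :
    ((l.map f).takeWhile p).length = ((l.map g).takeWhile q).length := by
  induction l with
  | nil => rfl
  | cons c cs ih =>
    have hc := h c (List.mem_cons_self)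
    by_cases hp : p (f c)
    · simp [hp, hc ▸ hp, ih (fun d hd => h d (List.mem_cons_of_mem _ hd))]
    · simp [hp, hc ▸ hp]

-- B's per-row frontier pass: filters the frontier and bumps exactly its survivors
lemma B_step (rl row : List Int) (active : List Int) :
    ∀ (counts acc : List Int), active.Nodup →
    (∀ m ∈ active, 0 ≤ m ∧ m < (counts.length : Int)) →
    (let res := active.foldl (fun (q : List Int × List Int) m =>
        if PySem.List.pyGetD rl m 0 ∈ row then
          (PySem.List.pySetD q.1 m (PySem.List.pyGetD q.1 m 0 + 1), q.2 ++ [m])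
        else q) (counts, acc)
     res.1.length = counts.length ∧
     res.2 = acc ++ active.filter (fun m => decide (PySem.List.pyGetD rl m 0 ∈ row)) ∧
     ∀ m : Int, 0 ≤ m → PySem.List.pyGetD res.1 m 0 =
       PySem.List.pyGetD counts m 0 +
         (if m ∈ active ∧ PySem.List.pyGetD rl m 0 ∈ row then 1 else 0)) := by
  induction active with
  | nil => intro counts acc _ _; simp
  | cons m0 rest ih =>
    intro counts acc hnd hbd
    have h0 := hbd m0 List.mem_cons_self
    have hm0n : ((m0.toNat : Nat) : Int) = m0 := Int.toNat_of_nonneg h0.1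
    by_cases hx : PySem.List.pyGetD rl m0 0 ∈ row
    · simp only [List.foldl_cons, hx, if_pos]
      have hlen1 : (PySem.List.pySetD counts m0 (PySem.List.pyGetD counts m0 0 + 1)).length
          = counts.length := by
        simp [PySem.List.length_pySetD]
      have hbd1 : ∀ m ∈ rest, 0 ≤ m ∧
          m < ((PySem.List.pySetD counts m0 (PySem.List.pyGetD counts m0 0 + 1)).length : Int) :=
        fun m hm => by rw [hlen1]; exact hbd m (List.mem_cons_of_mem _ hm)
      obtain ⟨l1, l2, l3⟩ := ih _ (acc ++ [m0]) hnd.of_cons hbd1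
      refine ⟨by rw [l1, hlen1], ?_, ?_⟩
      · rw [l2, List.filter_cons]
        simp [hx]
      · intro m hm
        rw [l3 m hm]
        have hmn : ((m.toNat : Nat) : Int) = m := Int.toNat_of_nonneg hm
        have hlt : m0.toNat < counts.length := by omega
        have key := PySem.List.pyGetD_pySetD_natCast (xs := counts) (n := m0.toNat)
          (m := m.toNat) (v := PySem.List.pyGetD counts m0 0 + 1) (d := 0) hlt
        rw [hm0n, hmn] at key
        rw [key]
        have hm0r : m0 ∉ rest := (List.nodup_cons.mp hnd).1
        by_cases hmm : m = m0
        · subst hmm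
          simp [hx, hm0r]
        · have : ¬ m.toNat = m0.toNat := by omega
          simp [this, hmm, hx, List.mem_cons]
    · simp only [List.foldl_cons, hx, if_neg, not_false_iff]
      obtain ⟨l1, l2, l3⟩ := ih counts acc hnd.of_cons
        (fun m hm => hbd m (List.mem_cons_of_mem _ hm))
      refine ⟨l1, ?_, ?_⟩
      · rw [l2, List.filter_cons]
        simp [hx]
      · intro m hm
        rw [l3 m hm]
        by_cases hmm : m = m0
        · subst hmm; simp [hx]
        · simp [hmm, List.mem_cons]

-- B's outer sweep: each surviving index accumulates the takeWhile prefix length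
lemma B_rows (rl : List Int) (rows : List (List Int)) :
    ∀ (counts active : List Int), active.Nodup →
    (∀ m ∈ active, 0 ≤ m ∧ m < (counts.length : Int)) →
    (let res := rows.foldl (fun (st : List Int × List Int) row =>
        st.2.foldl (fun (q : List Int × List Int) m =>
          if PySem.List.pyGetD rl m 0 ∈ row then
            (PySem.List.pySetD q.1 m (PySem.List.pyGetD q.1 m 0 + 1), q.2 ++ [m])
          else q) (st.1, ([] : List Int))) (counts, active)
     res.1.length = counts.length ∧
     ∀ m : Int, 0 ≤ m → PySem.List.pyGetD res.1 m 0 =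
       PySem.List.pyGetD counts m 0 +
         (if m ∈ active then
            ((rows.takeWhile (fun row => decide (PySem.List.pyGetD rl m 0 ∈ row))).length : Int)
          else 0)) := by
  induction rows with
  | nil =>
    intro counts active _ _
    refine ⟨rfl, fun m _ => ?_⟩
    split <;> simp
  | cons row rest ih =>
    intro counts active hnd hbd
    simp only [List.foldl_cons]
    obtain ⟨l1, l2, l3⟩ := B_step rl row active counts [] hnd hbd
    rw [List.nil_append] at l2
    cases hE : active.foldl (fun (q : List Int × List Int) m =>
        if PySem.List.pyGetD rl m 0 ∈ row then
          (PySem.List.pySetD q.1 m (PySem.List.pyGetD q.1 m 0 + 1), q.2 ++ [m])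
        else q) (counts, ([] : List Int)) with
    | mk c1 a1 =>
    rw [hE] at l1 l2 l3
    simp only at l1 l2 l3
    have hnd1 : a1.Nodup := l2 ▸ hnd.filter _
    have hbd1 : ∀ m ∈ a1, 0 ≤ m ∧ m < (c1.length : Int) := by
      intro m hm
      rw [l2] at hm
      have := hbd m (List.mem_of_mem_filter hm)
      omega
    obtain ⟨g1, g3⟩ := ih c1 a1 hnd1 hbd1
    refine ⟨g1.trans l1, fun m hm => ?_⟩
    rw [g3 m hm, l3 m hm]
    by_cases hma : m ∈ active
    · by_cases hx : PySem.List.pyGetD rl m 0 ∈ row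
      · have hm1 : m ∈ a1 := by rw [l2]; simp [List.mem_filter, hma, hx]
        simp only [List.takeWhile_cons, hx, decide_true, if_pos, hma, and_self, hm1,
          List.length_cons]
        push_cast
        ring
      · have hm1 : m ∉ a1 := by rw [l2]; simp [List.mem_filter, hx]
        simp [hx, hma, hm1]
    · have hm1 : m ∉ a1 := by rw [l2]; simp [List.mem_filter, hma]
      simp [hma, hm1]

lemma B_char (size : Int) (rl : List Int) :
    slotMachineParseRandomList_alt size rl
      = (PySem.List.pyRange 0 size 1).map (fun m => 1 + pvLen size rl (pvX rl m)) := by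
  have hfold : slotMachineParseRandomList_alt size rl
      = (((PySem.List.pyRange 1 size 1).map (fun r =>
            PySem.Set.ofList (PySem.List.slice rl (some (size * r)) (some (size * (r + 1)))))).foldl
          (fun (st : List Int × List Int) row =>
            st.2.foldl (fun (q : List Int × List Int) m =>
              if PySem.List.pyGetD rl m 0 ∈ row then
                (PySem.List.pySetD q.1 m (PySem.List.pyGetD q.1 m 0 + 1), q.2 ++ [m])
              else q) (st.1, ([] : List Int)))
          (PySem.List.pyRepeat [1] size, PySem.List.pyRange 0 size 1)).1 := by
    rw [List.foldl_map]
    rfl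
  have hc0 : (PySem.List.pyRepeat ([1] : List Int) size).length = size.toNat := by
    rw [PySem.List.pyRepeat_singleton]; simp
  obtain ⟨hlen, hval⟩ := B_rows rl
    ((PySem.List.pyRange 1 size 1).map (fun r =>
        PySem.Set.ofList (PySem.List.slice rl (some (size * r)) (some (size * (r + 1))))))
    (PySem.List.pyRepeat [1] size) (PySem.List.pyRange 0 size 1)
    (PySem.List.nodup_pyRange_one 0 size)
    (by
      intro m hm
      rw [PySem.List.mem_pyRange_one] at hm
      rw [hc0]
      omega)
  rw [hfold]
  have hrows : ((PySem.List.pyRange 1 size 1).map (fun r =>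
        PySem.Set.ofList (PySem.List.slice rl (some (size * r)) (some (size * (r + 1))))))
      = (List.range (size - 1).toNat).map (fun k : Nat =>
          PySem.Set.ofList (PySem.List.slice rl (some (size * (1 + (k : Int))))
            (some (size * (1 + (k : Int) + 1))))) := by
    rw [PySem.List.pyRange_one 1 size, List.map_map]
    rfl
  refine List.ext_getElem ?_ ?_
  · rw [hlen, hc0]
    simp [PySem.List.length_pyRange_one]
  · intro i h1 h2
    have hi : i < size.toNat := by rw [hlen, hc0] at h1; exact h1
    have him : ((i : Nat) : Int) ∈ PySem.List.pyRange 0 size 1 := by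
      rw [PySem.List.mem_pyRange_one]; omega
    have hv := hval ((i : Nat) : Int) (by positivity)
    rw [List.getElem_map, PySem.List.getElem_pyRange_one]
    rw [← List.getD_eq_getElem _ 0 h1, ← PySem.List.pyGetD_natCast, hv, if_pos him]
    have hone : PySem.List.pyGetD (PySem.List.pyRepeat ([1] : List Int) size) ((i : Nat) : Int) 0
        = 1 := by
      rw [PySem.List.pyRepeat_singleton, PySem.List.pyGetD_natCast,
        List.getD_eq_getElem _ 0 (by simpa using hi)]
      simp
    rw [hone]
    have hTW : ((((PySem.List.pyRange 1 size 1).map (fun r =>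
          PySem.Set.ofList (PySem.List.slice rl (some (size * r)) (some (size * (r + 1)))))).takeWhile
            (fun row => decide (PySem.List.pyGetD rl ((i : Nat) : Int) 0 ∈ row))).length : Int)
        = pvLen size rl (pvX rl ((i : Nat) : Int)) := by
      rw [hrows]
      unfold pvLen pvX
      congr 1
      refine takeWhile_length_map_eq (List.range (size - 1).toNat) _ _ _ _ ?_
      intro k _
      have e : PySem.List.slice rl (some (size * (1 + (k : Int))))
            (some (size * (1 + (k : Int) + 1))) = pvRow size rl k := by
        unfold pvRow
        congr 2 <;> ring
      rw [e]
      simp [PySem.Set.mem_ofList]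
    rw [hTW]
    simp

-- ===== VERDICT (by name: the statement is the Claim_ definition above) =====
theorem slotMachineParseRandomList_spec : Claim_equal_slotMachineParseRandomList := by
  intro size rl _ _
  unfold Spec_slotMachineParseRandomList
  rw [A_char, B_char]
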